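-- pv_equiv track=rewrite | github.com/ShogyX/PlingPling | Pling/ScriptFunctions/CapsFunction.py | convert_with_preset
-- ===== SOURCE A (Python) =====
-- def convert_with_preset(word_list, preset='all_caps'):
--     result = []
--     word_list = word_list if isinstance(word_list, list) else [word_list]
--
--     word_list = [item for item in word_list if len(item) > 1]
--
--     if preset == 'all_caps' or preset == '1':
--         for word in word_list:
--             result.append(word.upper())
--
--     elif preset == 'first_letter' or preset == '2':
--         for word in word_list:
--             result.append(word[0].upper() + word[1:])
--
--     elif preset == 'middle_letter' or preset == '3':
--         for word in word_list:
--             length = len(word)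
--             mid_index = length // 2
--             if length % 2 == 0:  # Even length
--                 result.append(word[:mid_index - 1] + word[mid_index - 1:mid_index + 1].upper() + word[mid_index + 1:])
--             else:
--                 result.append(word[:mid_index] + word[mid_index].upper() + word[mid_index + 1:])
--
--     elif preset == 'last_letter' or preset == '4':
--         for word in word_list:
--             result.append(word[:-1] + word[-1].upper())
--
--     elif preset == 'all_except_first_last' or preset == '5':
--         for word in word_list:
--             result.append(word[0] + word[1:-1].upper() + word[-1])
--
--     elif preset == 'all_except_first' or preset == '6':
--         for word in word_list:
--             result.append(word[0:1] + word[1:-1].upper()+ word[-1].upper())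
--
--     elif preset == 'all_except_last' or preset == '7':
--         for word in word_list:
--             result.append(word[:-1].upper() + word[-1])
--
--     elif preset == 'none_except_first_last' or preset == '8':
--             for word in word_list:
--                 result.append(word[0].upper() + word[1:-1] + word[-1].upper())
--
--     else:
--         for word in word_list:
--             result.append(word.upper())  # Default: all_caps
--
--     return result
-- ===== SOURCE B (Python) =====
-- # B: position-mask algorithm -- each preset is reduced to index interval(s) of the
-- # positions to uppercase, and every word is rebuilt in one per-character pass.
--
-- def _upper_spans(preset, n):
--     # half-open index intervals [lo, hi) whose characters get uppercased
--     if preset in ('first_letter', '2'):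
--         return [(0, 1)]
--     if preset in ('middle_letter', '3'):
--         return [((n - 1) // 2, n // 2 + 1)]
--     if preset in ('last_letter', '4'):
--         return [(n - 1, n)]
--     if preset in ('all_except_first_last', '5'):
--         return [(1, n - 1)]
--     if preset in ('all_except_first', '6'):
--         return [(1, n)]
--     if preset in ('all_except_last', '7'):
--         return [(0, n - 1)]
--     if preset in ('none_except_first_last', '8'):
--         return [(0, 1), (n - 1, n)]
--     return [(0, n)]  # all_caps / '1' / unknown preset
--
--
-- def convert_with_preset(word_list, preset='all_caps'):
--     if not isinstance(word_list, list):
--         word_list = [word_list]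
--     result = []
--     for w in word_list:
--         n = len(w)
--         if n > 1:
--             spans = _upper_spans(preset, n)
--             result.append(''.join(
--                 c.upper() if any(lo <= i < hi for lo, hi in spans) else c
--                 for i, c in enumerate(w)))
--     return result
-- ===== Notes on version B (the rewrite author's own statement) =====
-- stated objective: alternative
-- what changed: A builds each output word by a preset-specific chain of slice/.upper() concatenations inside eight separate loops; B instead reduces each preset to half-open index interval(s) of positions to uppercase and rebuilds every word in a single uniform per-character pass (uppercase a character iff its index lies in a span), with the all-positions span as the unknown-preset default.
import Mathlib
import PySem

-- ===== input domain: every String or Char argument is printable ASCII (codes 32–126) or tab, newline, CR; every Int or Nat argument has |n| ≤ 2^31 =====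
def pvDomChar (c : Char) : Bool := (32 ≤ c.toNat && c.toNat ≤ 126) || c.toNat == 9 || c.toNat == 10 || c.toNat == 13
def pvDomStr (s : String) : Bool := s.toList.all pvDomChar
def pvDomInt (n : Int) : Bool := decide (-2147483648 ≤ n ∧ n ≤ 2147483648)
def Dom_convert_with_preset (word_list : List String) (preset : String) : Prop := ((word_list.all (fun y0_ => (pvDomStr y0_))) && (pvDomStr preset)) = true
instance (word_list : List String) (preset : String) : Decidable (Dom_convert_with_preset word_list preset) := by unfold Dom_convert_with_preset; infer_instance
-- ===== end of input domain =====

-- B replaces A's eight per-preset slice-and-concatenate loops by a position-mask algorithm: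
-- each preset is reduced to index interval(s) of positions to uppercase, and every word is
-- rebuilt in one uniform per-character pass (objective: alternative).

-- ===== PORT A =====
def convert_with_preset (word_list : List String) (preset : String) : List String :=
  let wl := word_list.filter (fun item => 1 < PySem.Str.len item)
  if preset == "all_caps" || preset == "1" then
    wl.foldl (fun result word => result ++ [PySem.Str.upper word]) []
  else if preset == "first_letter" || preset == "2" then
    wl.foldl (fun result word => result ++
      [String.ofList (PySem.Chars.upper [PySem.List.pyGetD word.toList 0 ' '] ++
        PySem.List.slice word.toList (some 1) none)]) []
  else if preset == "middle_letter" || preset == "3" then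
    wl.foldl (fun result word =>
      let length : Int := PySem.Str.len word
      let mid_index : Int := PySem.Int.floordiv length 2
      if PySem.Int.mod length 2 == 0 then
        result ++ [String.ofList (PySem.List.slice word.toList none (some (mid_index - 1)) ++
          PySem.Chars.upper (PySem.List.slice word.toList (some (mid_index - 1)) (some (mid_index + 1))) ++
          PySem.List.slice word.toList (some (mid_index + 1)) none)]
      else
        result ++ [String.ofList (PySem.List.slice word.toList none (some mid_index) ++
          PySem.Chars.upper [PySem.List.pyGetD word.toList mid_index ' '] ++
          PySem.List.slice word.toList (some (mid_index + 1)) none)]) []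
  else if preset == "last_letter" || preset == "4" then
    wl.foldl (fun result word => result ++
      [String.ofList (PySem.List.slice word.toList none (some (-1)) ++
        PySem.Chars.upper [PySem.List.pyGetD word.toList (-1) ' '])]) []
  else if preset == "all_except_first_last" || preset == "5" then
    wl.foldl (fun result word => result ++
      [String.ofList ([PySem.List.pyGetD word.toList 0 ' '] ++
        PySem.Chars.upper (PySem.List.slice word.toList (some 1) (some (-1))) ++
        [PySem.List.pyGetD word.toList (-1) ' '])]) []
  else if preset == "all_except_first" || preset == "6" then
    wl.foldl (fun result word => result ++
      [String.ofList (PySem.List.slice word.toList (some 0) (some 1) ++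
        PySem.Chars.upper (PySem.List.slice word.toList (some 1) (some (-1))) ++
        PySem.Chars.upper [PySem.List.pyGetD word.toList (-1) ' '])]) []
  else if preset == "all_except_last" || preset == "7" then
    wl.foldl (fun result word => result ++
      [String.ofList (PySem.Chars.upper (PySem.List.slice word.toList none (some (-1))) ++
        [PySem.List.pyGetD word.toList (-1) ' '])]) []
  else if preset == "none_except_first_last" || preset == "8" then
    wl.foldl (fun result word => result ++
      [String.ofList (PySem.Chars.upper [PySem.List.pyGetD word.toList 0 ' '] ++
        PySem.List.slice word.toList (some 1) (some (-1)) ++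
        PySem.Chars.upper [PySem.List.pyGetD word.toList (-1) ' '])]) []
  else
    wl.foldl (fun result word => result ++ [PySem.Str.upper word]) []

-- ===== PORT B =====
-- half-open index intervals [lo, hi) whose characters get uppercased (Source B's _upper_spans)
def pvUpperSpans (preset : String) (n : Int) : List (Int × Int) :=
  if preset == "first_letter" || preset == "2" then [(0, 1)]
  else if preset == "middle_letter" || preset == "3" then
    [(PySem.Int.floordiv (n - 1) 2, PySem.Int.floordiv n 2 + 1)]
  else if preset == "last_letter" || preset == "4" then [(n - 1, n)]
  else if preset == "all_except_first_last" || preset == "5" then [(1, n - 1)]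
  else if preset == "all_except_first" || preset == "6" then [(1, n)]
  else if preset == "all_except_last" || preset == "7" then [(0, n - 1)]
  else if preset == "none_except_first_last" || preset == "8" then [(0, 1), (n - 1, n)]
  else [(0, n)]  -- all_caps / '1' / unknown preset

-- Source B's masked join: uppercase a character iff its index lies in one of the spans
def pvMaskChars (spans : List (Int × Int)) (l : List Char) : List Char :=
  (PySem.List.enumerate l 0).map (fun ic =>
    if spans.any (fun p => decide (p.1 ≤ ic.1) && decide (ic.1 < p.2)) then
      PySem.Chars.upperChar ic.2 else ic.2)

def pvMaskWord (spans : List (Int × Int)) (w : String) : String :=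
  String.ofList (pvMaskChars spans w.toList)

def convert_with_preset_alt (word_list : List String) (preset : String) : List String :=
  word_list.foldl (fun result w =>
    let n : Int := PySem.Str.len w
    if 1 < n then result ++ [pvMaskWord (pvUpperSpans preset n) w] else result) []

-- ===== PRECONDITION & SPEC =====
def Spec_convert_with_preset (word_list : List String) (preset : String) (out : List String) : Prop := out = convert_with_preset_alt word_list preset
instance (word_list : List String) (preset : String) (out : List String) : Decidable (Spec_convert_with_preset word_list preset out) := by unfold Spec_convert_with_preset; infer_instance

-- ===== CLAIM (what is proved, stated in full; the proofs are below) =====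
def Claim_equal_convert_with_preset : Prop := ∀ (word_list : List String) (preset : String), Dom_convert_with_preset word_list preset → Spec_convert_with_preset word_list preset (convert_with_preset word_list preset)

-- ===== LEMMAS AND PROOFS =====

-- the filtered word list both programs process
def pvFilt (wl : List String) : List String := wl.filter (fun w => 1 < PySem.Str.len w)

-- B's conditional-append loop is the map over the filtered list
theorem pvAltEq (wl : List String) (preset : String) :
    convert_with_preset_alt wl preset
      = (pvFilt wl).map (fun w => pvMaskWord (pvUpperSpans preset (PySem.Str.len w)) w) := by
  unfold convert_with_preset_alt pvFilt
  suffices h : ∀ (l : List String) (acc : List String),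
      l.foldl (fun result w =>
        if 1 < PySem.Str.len w then result ++ [pvMaskWord (pvUpperSpans preset (PySem.Str.len w)) w]
        else result) acc
        = acc ++ (l.filter (fun w => 1 < PySem.Str.len w)).map
            (fun w => pvMaskWord (pvUpperSpans preset (PySem.Str.len w)) w) by
    simpa using h wl []
  intro l
  induction l with
  | nil => simp
  | cons a t ih =>
    intro acc
    rw [List.foldl_cons, List.filter_cons]
    by_cases h : 1 < PySem.Str.len a
    · rw [if_pos h, ih, if_pos (decide_eq_true h)]
      simp only [List.map_cons, List.append_assoc, List.cons_append, List.nil_append]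
    · rw [if_neg h, ih, if_neg (by simpa using h)]

-- append-loop over a two-way if is a map of the two-way if
theorem pvFoldlIte {A B : Type} (c : A → Bool) (f g : A → B) (l : List A) (acc : List B) :
    l.foldl (fun r w => if c w then r ++ [f w] else r ++ [g w]) acc
      = acc ++ l.map (fun w => if c w then f w else g w) := by
  induction l generalizing acc with
  | nil => simp
  | cons a t ih => by_cases h : c a <;> simp [h, ih]

-- a simple append loop of A equals the map of the same transform
theorem pvBranch (wl : List String) (f : String → String) :
    (pvFilt wl).foldl (fun r w => r ++ [f w]) [] = (pvFilt wl).map f := by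
  rw [PySem.List.foldl_append_singleton_eq_map, List.nil_append]

-- words surviving the filter have at least two characters
theorem pvLenTwo {wl : List String} {w : String} (h : w ∈ pvFilt wl) : 2 ≤ w.toList.length := by
  have := (List.mem_filter.mp h).2
  simp only [decide_eq_true_eq, PySem.Str.len_eq] at this
  omega

-- mask of one interval [a, b) with a ≤ b ≤ |l| is take/uppercase-slice/drop
theorem pvMaskOne (l : List Char) (a b : Nat) (hab : a ≤ b) (hb : b ≤ l.length) :
    pvMaskChars [((a : Int), (b : Int))] l
      = l.take a ++ ((l.drop a).take (b - a)).map PySem.Chars.upperChar ++ l.drop b := by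
  have h1 : (List.take a l).length = a := by simp; omega
  have h2 : (List.map PySem.Chars.upperChar (List.take (b - a) (List.drop a l))).length = b - a := by
    simp; omega
  apply List.ext_getElem
  · simp [pvMaskChars, PySem.List.length_enumerate]; omega
  · intro i hL hR
    have hi : i < l.length := by simpa [pvMaskChars, PySem.List.length_enumerate] using hL
    simp only [pvMaskChars, List.getElem_map, PySem.List.getElem_enumerate, List.any_cons,
      List.any_nil, Bool.or_false, Bool.and_eq_true, decide_eq_true_eq, zero_add]
    by_cases hia : i < a
    · rw [List.getElem_append_left (by rw [List.length_append, h1, h2]; omega),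
         List.getElem_append_left (by rw [h1]; omega), List.getElem_take]
      rw [if_neg (by omega)]
    · by_cases hib : i < b
      · rw [List.getElem_append_left (by rw [List.length_append, h1, h2]; omega),
           List.getElem_append_right (by rw [h1]; omega)]
        simp only [h1, List.getElem_map, List.getElem_take, List.getElem_drop]
        rw [if_pos (by omega)]
        congr 2
        omega
      · rw [List.getElem_append_right (by rw [List.length_append, h1, h2]; omega)]
        simp only [List.length_append, h1, h2, List.getElem_drop]
        rw [if_neg (by omega)]
        congr 1
        omega

-- mask of the two intervals [0,1) and [n-1,n): first and last character uppercased
theorem pvMaskTwo (l : List Char) (hn : 2 ≤ l.length) :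
    pvMaskChars [((0:Int), (1:Int)), ((l.length : Int) - 1, (l.length : Int))] l
      = (l.take 1).map PySem.Chars.upperChar ++ (l.drop 1).take (l.length - 2) ++
        (l.drop (l.length - 1)).map PySem.Chars.upperChar := by
  have h1 : ((l.take 1).map PySem.Chars.upperChar).length = 1 := by simp; omega
  have h2 : ((l.drop 1).take (l.length - 2)).length = l.length - 2 := by simp; omega
  apply List.ext_getElem
  · simp [pvMaskChars, PySem.List.length_enumerate]; omega
  · intro i hL hR
    have hi : i < l.length := by simpa [pvMaskChars, PySem.List.length_enumerate] using hL
    simp only [pvMaskChars, List.getElem_map, PySem.List.getElem_enumerate, List.any_cons,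
      List.any_nil, Bool.or_false, zero_add]
    by_cases hia : i < 1
    · rw [List.getElem_append_left (by rw [List.length_append, h1, h2]; omega),
         List.getElem_append_left (by rw [h1]; omega)]
      simp only [List.getElem_map, List.getElem_take]
      rw [if_pos (by simp; omega)]
    · by_cases hib : i < l.length - 1
      · rw [List.getElem_append_left (by rw [List.length_append, h1, h2]; omega),
           List.getElem_append_right (by rw [h1]; omega)]
        simp only [h1, List.getElem_take, List.getElem_drop]
        rw [if_neg (by simp; omega)]
        congr 1
        omega
      · rw [List.getElem_append_right (by rw [List.length_append, h1, h2]; omega)]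
        simp only [List.length_append, h1, h2, List.getElem_map, List.getElem_drop]
        rw [if_pos (by simp; omega)]
        congr 2
        omega

-- small slice/index facts on words of length ≥ 2
theorem pvTake1 (l : List Char) (h : l ≠ []) : l.take 1 = [PySem.List.pyGetD l 0 ' '] := by
  cases l with
  | nil => exact absurd rfl h
  | cons a t => rw [PySem.List.pyGetD_zero]; rfl

theorem pvDropPen (l : List Char) (hn : 2 ≤ l.length) :
    l.drop (l.length - 1) = [PySem.List.pyGetD l (-1) ' '] := by
  have h : l ≠ [] := by intro e; rw [e] at hn; simp at hn
  rw [PySem.List.pyGetD_neg_one l ' ' h]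
  apply List.ext_getElem
  · simp; omega
  · intro i h1 h2
    have hi0 : i = 0 := by simp at h1; omega
    subst hi0
    simp only [List.getElem_drop, List.getElem_cons_zero]
    have hidx : l.length - 1 + 0 = l.length - 1 := by omega
    rw [List.getLast_eq_getElem]
    simp [hidx]

theorem pvSliceMid (l : List Char) (hn : 2 ≤ l.length) :
    PySem.List.slice l (some 1) (some (-1)) = (l.drop 1).take (l.length - 2) := by
  have h1 : PySem.List.clampIdx l.length 1 = 1 := by
    simp [PySem.List.clampIdx]; omega
  have h2 : PySem.List.clampIdx l.length (-1) = l.length - 1 :=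
    PySem.List.clampIdx_neg_one l.length
  show List.take (PySem.List.clampIdx l.length (-1) - PySem.List.clampIdx l.length 1)
      (List.drop (PySem.List.clampIdx l.length 1) l) = (l.drop 1).take (l.length - 2)
  rw [h1, h2, show l.length - 1 - 1 = l.length - 2 from by omega]

-- A's uniform middle_letter form (even/odd branches collapse to one slice window)
theorem pvMid_list (l : List Char) (hn : 2 ≤ l.length) :
    (if PySem.Int.mod (l.length : Int) 2 == 0 then
      String.ofList (PySem.List.slice l none (some (PySem.Int.floordiv (l.length : Int) 2 - 1)) ++
        PySem.Chars.upper (PySem.List.slice l (some (PySem.Int.floordiv (l.length : Int) 2 - 1)) (some (PySem.Int.floordiv (l.length : Int) 2 + 1))) ++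
        PySem.List.slice l (some (PySem.Int.floordiv (l.length : Int) 2 + 1)) none)
    else
      String.ofList (PySem.List.slice l none (some (PySem.Int.floordiv (l.length : Int) 2)) ++
        PySem.Chars.upper [PySem.List.pyGetD l (PySem.Int.floordiv (l.length : Int) 2) ' '] ++
        PySem.List.slice l (some (PySem.Int.floordiv (l.length : Int) 2 + 1)) none))
    = String.ofList (PySem.List.slice l none (some (PySem.Int.floordiv ((l.length : Int) - 1) 2)) ++
        PySem.Chars.upper (PySem.List.slice l (some (PySem.Int.floordiv ((l.length : Int) - 1) 2)) (some (PySem.Int.floordiv (l.length : Int) 2 + 1))) ++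
        PySem.List.slice l (some (PySem.Int.floordiv (l.length : Int) 2 + 1)) none) := by
  rw [PySem.Int.mod_eq_emod_of_pos (by omega : (0:Int) < 2)]
  rw [PySem.Int.floordiv_eq_ediv_of_pos (by omega : (0:Int) < 2)]
  rw [PySem.Int.floordiv_eq_ediv_of_pos (by omega : (0:Int) < 2)]
  by_cases hp : (l.length : Int) % 2 = 0
  · have hs : ((l.length : Int) - 1) / 2 = (l.length : Int) / 2 - 1 := by omega
    simp [hp, hs]
  · have hs : ((l.length : Int) - 1) / 2 = (l.length : Int) / 2 := by omega
    have hk : ((l.length : Int) / 2) = ((l.length / 2 : Nat) : Int) := by omega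
    have hlt : l.length / 2 < l.length := by omega
    simp only [hp, hs, hk, beq_iff_eq, if_false]
    rw [show PySem.List.slice l (some ((l.length / 2 : Nat) : Int)) (some (((l.length / 2 : Nat) : Int) + 1)) = [l[l.length / 2]] from by
      rw [show (((l.length / 2 : Nat) : Int) + 1) = ((l.length / 2 + 1 : Nat) : Int) by omega, PySem.List.slice_natCast,
          List.drop_eq_getElem_cons hlt, show l.length / 2 + 1 - l.length / 2 = 1 by omega]
      rfl]
    rw [PySem.List.pyGetD_eq_getElem l ' ' (by omega) (by push_cast; omega)]
    have ht : ((l.length : Int) / 2).toNat = l.length / 2 := by omega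
    simp [ht]

-- per-word branch lemmas: A's slice expression = B's mask, for words of length ≥ 2
theorem pvW_allcaps (w : String) :
    PySem.Str.upper w = pvMaskWord [(0, PySem.Str.len w)] w := by
  unfold pvMaskWord PySem.Str.upper
  congr 1
  have hb : PySem.Str.len w = ((w.toList.length : Nat) : Int) := by simp
  have hm := pvMaskOne w.toList 0 w.toList.length (by omega) (by omega)
  simp only [Nat.cast_zero] at hm
  rw [hb, hm]
  simp only [List.take_zero, List.drop_zero, Nat.sub_zero, List.take_length, List.drop_length,
    List.nil_append, List.append_nil, PySem.Chars.upper]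

theorem pvW_first (w : String) (hn : 2 ≤ w.toList.length) :
    String.ofList (PySem.Chars.upper [PySem.List.pyGetD w.toList 0 ' '] ++
      PySem.List.slice w.toList (some 1) none)
      = pvMaskWord [(0, 1)] w := by
  have hne : w.toList ≠ [] := by intro e; rw [e] at hn; simp at hn
  unfold pvMaskWord
  congr 1
  have hm := pvMaskOne w.toList 0 1 (by omega) (by omega)
  simp only [Nat.cast_zero, Nat.cast_one] at hm
  rw [hm, PySem.List.slice_from_one]
  simp only [List.take_zero, List.nil_append, List.drop_zero, Nat.sub_zero]
  rw [pvTake1 w.toList hne]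
  simp [PySem.Chars.upper, List.drop_one]

theorem pvW_last (w : String) (hn : 2 ≤ w.toList.length) :
    String.ofList (PySem.List.slice w.toList none (some (-1)) ++
      PySem.Chars.upper [PySem.List.pyGetD w.toList (-1) ' '])
      = pvMaskWord [(PySem.Str.len w - 1, PySem.Str.len w)] w := by
  unfold pvMaskWord
  congr 1
  have hb : PySem.Str.len w = ((w.toList.length : Nat) : Int) := by simp
  have ha : PySem.Str.len w - 1 = ((w.toList.length - 1 : Nat) : Int) := by rw [hb]; omega
  have hm := pvMaskOne w.toList (w.toList.length - 1) w.toList.length (by omega) (by omega)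
  rw [ha, hb, hm, PySem.List.slice_to_neg_one, List.dropLast_eq_take,
      show w.toList.length - (w.toList.length - 1) = 1 by omega, pvDropPen w.toList hn]
  simp [PySem.Chars.upper]

theorem pvW_aefl (w : String) (hn : 2 ≤ w.toList.length) :
    String.ofList ([PySem.List.pyGetD w.toList 0 ' '] ++
      PySem.Chars.upper (PySem.List.slice w.toList (some 1) (some (-1))) ++
      [PySem.List.pyGetD w.toList (-1) ' '])
      = pvMaskWord [(1, PySem.Str.len w - 1)] w := by
  have hne : w.toList ≠ [] := by intro e; rw [e] at hn; simp at hn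
  unfold pvMaskWord
  congr 1
  have hb : PySem.Str.len w = ((w.toList.length : Nat) : Int) := by simp
  have ha : PySem.Str.len w - 1 = ((w.toList.length - 1 : Nat) : Int) := by rw [hb]; omega
  have hm := pvMaskOne w.toList 1 (w.toList.length - 1) (by omega) (by omega)
  simp only [Nat.cast_one] at hm
  rw [ha, hm, pvSliceMid w.toList hn, pvTake1 w.toList hne, pvDropPen w.toList hn,
      show w.toList.length - 1 - 1 = w.toList.length - 2 by omega]
  simp [PySem.Chars.upper]

theorem pvW_aef (w : String) (hn : 2 ≤ w.toList.length) :
    String.ofList (PySem.List.slice w.toList (some 0) (some 1) ++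
      PySem.Chars.upper (PySem.List.slice w.toList (some 1) (some (-1))) ++
      PySem.Chars.upper [PySem.List.pyGetD w.toList (-1) ' '])
      = pvMaskWord [(1, PySem.Str.len w)] w := by
  have hne : w.toList ≠ [] := by intro e; rw [e] at hn; simp at hn
  unfold pvMaskWord
  congr 1
  have hb : PySem.Str.len w = ((w.toList.length : Nat) : Int) := by simp
  have hsplit : List.take (w.toList.length - 2) (w.toList.drop 1) ++ w.toList.drop (w.toList.length - 1)
      = w.toList.drop 1 := by
    have h := List.take_append_drop (w.toList.length - 2) (w.toList.drop 1)
    rw [List.drop_drop, show 1 + (w.toList.length - 2) = w.toList.length - 1 by omega] at h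
    exact h
  have hm := pvMaskOne w.toList 1 w.toList.length (by omega) (by omega)
  simp only [Nat.cast_one] at hm
  rw [show List.take (w.toList.length - 1) (w.toList.drop 1) = w.toList.drop 1 from
        List.take_of_length_le (by simp), List.drop_length, List.append_nil] at hm
  rw [hb, hm, pvSliceMid w.toList hn, PySem.List.slice_zero_start,
      PySem.List.slice_to w.toList (by omega : (0:Int) ≤ 1), ← pvDropPen w.toList hn]
  simp only [PySem.Chars.upper, Int.toNat_one]
  rw [List.append_assoc, ← List.map_append, hsplit]

theorem pvW_ael (w : String) (hn : 2 ≤ w.toList.length) :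
    String.ofList (PySem.Chars.upper (PySem.List.slice w.toList none (some (-1))) ++
      [PySem.List.pyGetD w.toList (-1) ' '])
      = pvMaskWord [(0, PySem.Str.len w - 1)] w := by
  unfold pvMaskWord
  congr 1
  have hb : PySem.Str.len w = ((w.toList.length : Nat) : Int) := by simp
  have ha : PySem.Str.len w - 1 = ((w.toList.length - 1 : Nat) : Int) := by rw [hb]; omega
  have hm := pvMaskOne w.toList 0 (w.toList.length - 1) (by omega) (by omega)
  simp only [Nat.cast_zero] at hm
  rw [ha, hm, PySem.List.slice_to_neg_one, List.dropLast_eq_take, pvDropPen w.toList hn]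
  simp [PySem.Chars.upper]

theorem pvW_nefl (w : String) (hn : 2 ≤ w.toList.length) :
    String.ofList (PySem.Chars.upper [PySem.List.pyGetD w.toList 0 ' '] ++
      PySem.List.slice w.toList (some 1) (some (-1)) ++
      PySem.Chars.upper [PySem.List.pyGetD w.toList (-1) ' '])
      = pvMaskWord [(0, 1), (PySem.Str.len w - 1, PySem.Str.len w)] w := by
  have hne : w.toList ≠ [] := by intro e; rw [e] at hn; simp at hn
  unfold pvMaskWord
  congr 1
  have hb : PySem.Str.len w = ((w.toList.length : Nat) : Int) := by simp
  rw [hb, pvMaskTwo w.toList hn, pvSliceMid w.toList hn, pvTake1 w.toList hne,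
      pvDropPen w.toList hn]
  simp [PySem.Chars.upper]

theorem pvW_mid (w : String) (hn : 2 ≤ w.toList.length) :
    String.ofList (PySem.List.slice w.toList none (some (PySem.Int.floordiv ((w.toList.length : Int) - 1) 2)) ++
      PySem.Chars.upper (PySem.List.slice w.toList (some (PySem.Int.floordiv ((w.toList.length : Int) - 1) 2)) (some (PySem.Int.floordiv (w.toList.length : Int) 2 + 1))) ++
      PySem.List.slice w.toList (some (PySem.Int.floordiv (w.toList.length : Int) 2 + 1)) none)
      = pvMaskWord [(PySem.Int.floordiv (PySem.Str.len w - 1) 2,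
          PySem.Int.floordiv (PySem.Str.len w) 2 + 1)] w := by
  unfold pvMaskWord
  congr 1
  have hb : PySem.Str.len w = ((w.toList.length : Nat) : Int) := by simp
  have hs : PySem.Int.floordiv ((w.toList.length : Int) - 1) 2 = (((w.toList.length - 1) / 2 : Nat) : Int) := by
    rw [PySem.Int.floordiv_eq_ediv_of_pos (by omega : (0:Int) < 2)]; omega
  have he : PySem.Int.floordiv ((w.toList.length : Int)) 2 + 1 = ((w.toList.length / 2 + 1 : Nat) : Int) := by
    rw [PySem.Int.floordiv_eq_ediv_of_pos (by omega : (0:Int) < 2)]; omega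
  have hm := pvMaskOne w.toList ((w.toList.length - 1) / 2) (w.toList.length / 2 + 1)
    (by omega) (by omega)
  rw [hb, hs, he, hm, PySem.List.slice_to_natCast, PySem.List.slice_natCast,
      PySem.List.slice_from_natCast]
  simp [PySem.Chars.upper]

-- the middle_letter branch of A as a map over the filtered list
theorem pvMidBranch (wl : List String) :
    (pvFilt wl).foldl (fun result word =>
      if PySem.Int.mod (PySem.Str.len word) 2 == 0 then
        result ++ [String.ofList (PySem.List.slice word.toList none (some (PySem.Int.floordiv (PySem.Str.len word) 2 - 1)) ++
          PySem.Chars.upper (PySem.List.slice word.toList (some (PySem.Int.floordiv (PySem.Str.len word) 2 - 1)) (some (PySem.Int.floordiv (PySem.Str.len word) 2 + 1))) ++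
          PySem.List.slice word.toList (some (PySem.Int.floordiv (PySem.Str.len word) 2 + 1)) none)]
      else
        result ++ [String.ofList (PySem.List.slice word.toList none (some (PySem.Int.floordiv (PySem.Str.len word) 2)) ++
          PySem.Chars.upper [PySem.List.pyGetD word.toList (PySem.Int.floordiv (PySem.Str.len word) 2) ' '] ++
          PySem.List.slice word.toList (some (PySem.Int.floordiv (PySem.Str.len word) 2 + 1)) none)]) []
      = (pvFilt wl).map (fun w => pvMaskWord [(PySem.Int.floordiv (PySem.Str.len w - 1) 2,
          PySem.Int.floordiv (PySem.Str.len w) 2 + 1)] w) := by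
  rw [pvFoldlIte, List.nil_append]
  apply List.map_congr_left
  intro w hw
  have h2 := pvLenTwo hw
  simp only [PySem.Str.len_eq]
  rw [pvMid_list w.toList h2]
  exact pvW_mid w h2

-- ===== VERDICT (by name: the statement is the Claim_ definition above) =====
set_option maxHeartbeats 2000000 in
theorem convert_with_preset_spec : Claim_equal_convert_with_preset := by
  intro wl preset _
  unfold Spec_convert_with_preset
  rw [pvAltEq]
  by_cases e1 : preset = "all_caps"
  · subst e1
    exact (pvBranch wl _).trans (List.map_congr_left (fun w _ => pvW_allcaps w))
  by_cases e2 : preset = "1"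
  · subst e2
    exact (pvBranch wl _).trans (List.map_congr_left (fun w _ => pvW_allcaps w))
  by_cases e3 : preset = "first_letter"
  · subst e3
    exact (pvBranch wl _).trans (List.map_congr_left (fun w hw => pvW_first w (pvLenTwo hw)))
  by_cases e4 : preset = "2"
  · subst e4
    exact (pvBranch wl _).trans (List.map_congr_left (fun w hw => pvW_first w (pvLenTwo hw)))
  by_cases e5 : preset = "middle_letter"
  · subst e5
    exact pvMidBranch wl
  by_cases e6 : preset = "3"
  · subst e6
    exact pvMidBranch wl
  by_cases e7 : preset = "last_letter"
  · subst e7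
    exact (pvBranch wl _).trans (List.map_congr_left (fun w hw => pvW_last w (pvLenTwo hw)))
  by_cases e8 : preset = "4"
  · subst e8
    exact (pvBranch wl _).trans (List.map_congr_left (fun w hw => pvW_last w (pvLenTwo hw)))
  by_cases e9 : preset = "all_except_first_last"
  · subst e9
    exact (pvBranch wl _).trans (List.map_congr_left (fun w hw => pvW_aefl w (pvLenTwo hw)))
  by_cases e10 : preset = "5"
  · subst e10
    exact (pvBranch wl _).trans (List.map_congr_left (fun w hw => pvW_aefl w (pvLenTwo hw)))
  by_cases e11 : preset = "all_except_first"
  · subst e11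
    exact (pvBranch wl _).trans (List.map_congr_left (fun w hw => pvW_aef w (pvLenTwo hw)))
  by_cases e12 : preset = "6"
  · subst e12
    exact (pvBranch wl _).trans (List.map_congr_left (fun w hw => pvW_aef w (pvLenTwo hw)))
  by_cases e13 : preset = "all_except_last"
  · subst e13
    exact (pvBranch wl _).trans (List.map_congr_left (fun w hw => pvW_ael w (pvLenTwo hw)))
  by_cases e14 : preset = "7"
  · subst e14
    exact (pvBranch wl _).trans (List.map_congr_left (fun w hw => pvW_ael w (pvLenTwo hw)))
  by_cases e15 : preset = "none_except_first_last"
  · subst e15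
    exact (pvBranch wl _).trans (List.map_congr_left (fun w hw => pvW_nefl w (pvLenTwo hw)))
  by_cases e16 : preset = "8"
  · subst e16
    exact (pvBranch wl _).trans (List.map_congr_left (fun w hw => pvW_nefl w (pvLenTwo hw)))
  have hA : convert_with_preset wl preset
      = (pvFilt wl).foldl (fun r w => r ++ [PySem.Str.upper w]) [] := by
    unfold convert_with_preset
    simp [e1, e2, e3, e4, e5, e6, e7, e8, e9, e10, e11, e12, e13, e14, e15, e16, pvFilt]
  have hS : ∀ n, pvUpperSpans preset n = [(0, n)] := by
    intro n
    unfold pvUpperSpans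
    simp [e3, e4, e5, e6, e7, e8, e9, e10, e11, e12, e13, e14, e15, e16]
  rw [hA]
  exact (pvBranch wl _).trans (List.map_congr_left (fun w _ => by rw [hS]; exact pvW_allcaps w))
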